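-- pv_equiv track=rewrite | github.com/BloomLonely/KR_ToMi | scripts/en_evaluate_exaone_4_32b.py | parse_story_qa
-- ===== SOURCE A (Python) =====
-- from typing import List, Dict
--
-- def parse_story_qa(story_lines: List[str]) -> Dict[str, str]:
--     context = []
--     question = None
--     answer = None
--
--     for line in story_lines:
--         if '\t' in line:
--             parts = line.split('\t')
--             question_line = parts[0]
--             answer = parts[1]
--
--             question = question_line.split(' ', 1)[1] if ' ' in question_line else question_line
--         else:
--             text = line.split(' ', 1)[1] if ' ' in line else line
--             context.append(text)
--
--     return {
--         'context': '\n'.join(context),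
--         'question': question,
--         'answer': answer
--     }
-- ===== SOURCE B (Python) =====
-- def parse_story_qa(story_lines):
--     def after_space(s):
--         return s.split(' ', 1)[1] if ' ' in s else s
--
--     context = '\n'.join(after_space(l) for l in story_lines if '\t' not in l)
--     question = None
--     answer = None
--     for line in reversed(story_lines):
--         if '\t' in line:
--             parts = line.split('\t')
--             answer = parts[1]
--             question = after_space(parts[0])
--             break
--     return {'context': context, 'question': question, 'answer': answer}
-- ===== Notes on version B (the rewrite author's own statement) =====
-- stated objective: alternative
-- what changed: Replaces A's single stateful loop with two independent passes: a filter+map+join builds the context from non-tab lines, and a reverse scan that stops at the first tab line yields question/answer (last tab line wins).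
import Mathlib
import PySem

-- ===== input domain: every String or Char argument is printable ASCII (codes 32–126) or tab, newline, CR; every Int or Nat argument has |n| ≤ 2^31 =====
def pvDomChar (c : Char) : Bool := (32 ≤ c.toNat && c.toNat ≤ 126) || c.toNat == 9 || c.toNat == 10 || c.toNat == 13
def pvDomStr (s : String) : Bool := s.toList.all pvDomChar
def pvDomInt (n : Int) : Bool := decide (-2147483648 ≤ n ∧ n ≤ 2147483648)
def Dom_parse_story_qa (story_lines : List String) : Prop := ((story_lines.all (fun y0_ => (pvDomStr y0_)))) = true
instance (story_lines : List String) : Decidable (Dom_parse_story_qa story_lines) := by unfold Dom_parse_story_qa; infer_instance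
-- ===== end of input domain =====

-- B rebuilds the same dict with two independent passes (filter/map/join for the context, a reverse
-- scan stopping at the first tab line for question/answer) instead of A's single stateful loop.


-- ===== PORT A =====
-- shared helper: the expression "s.split(' ', 1)[1] if ' ' in s else s" occurring in both Pythons
def pvAfterSpace (s : String) : String :=
  if PySem.Str.isIn " " s then
    PySem.List.pyGetD ((PySem.Str.splitMax? s " " 1).getD []) 1 ""  -- ' ' in s, so index 1 exists
  else s

def pvStepA (st : List String × Option String × Option String) (line : String) :
    List String × Option String × Option String :=
  if PySem.Str.isIn "\t" line then
    let parts := (PySem.Str.split? line "\t").getD []  -- split('\t'); sep nonempty, never none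
    let question_line := PySem.List.pyGetD parts 0 ""   -- parts[0]; split is never empty
    (st.1, some (pvAfterSpace question_line), PySem.List.pyGet? parts 1)  -- parts[1]
  else
    (st.1 ++ [pvAfterSpace line], st.2.1, st.2.2)

def parse_story_qa (story_lines : List String) : List (String × Option String) :=
  let st := story_lines.foldl pvStepA ([], none, none)
  [("context", some (PySem.Str.join "\n" st.1)), ("question", st.2.1), ("answer", st.2.2)]

-- ===== PORT B =====
-- reverse scan: first tab-containing line of the (reversed) list, as (question, answer)
def pvLastTab : List String → Option (String × Option String)
  | [] => none
  | l :: rest =>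
    if PySem.Str.isIn "\t" l then
      let parts := (PySem.Str.split? l "\t").getD []  -- split('\t'); sep nonempty, never none
      some (pvAfterSpace (PySem.List.pyGetD parts 0 ""), PySem.List.pyGet? parts 1)
    else pvLastTab rest

def parse_story_qa_alt (story_lines : List String) : List (String × Option String) :=
  let context := PySem.Str.join "\n"
    ((story_lines.filter (fun l => !PySem.Str.isIn "\t" l)).map pvAfterSpace)
  let qa := pvLastTab story_lines.reverse
  [("context", some context), ("question", qa.map (fun p => p.1)),
   ("answer", qa.bind (fun p => p.2))]

-- ===== PRECONDITION & SPEC =====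
def Spec_parse_story_qa (story_lines : List String) (out : List (String × Option String)) : Prop := out = parse_story_qa_alt story_lines
instance (story_lines : List String) (out : List (String × Option String)) : Decidable (Spec_parse_story_qa story_lines out) := by unfold Spec_parse_story_qa; infer_instance

-- ===== CLAIM (what is proved, stated in full; the proofs are below) =====
def Claim_equal_parse_story_qa : Prop := ∀ (story_lines : List String), Dom_parse_story_qa story_lines → Spec_parse_story_qa story_lines (parse_story_qa story_lines)

-- ===== LEMMAS AND PROOFS =====
theorem pvLastTab_append (ys zs : List String) :
    pvLastTab (ys ++ zs) = ((pvLastTab ys).elim (pvLastTab zs) some) := by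
  induction ys with
  | nil => simp [pvLastTab]
  | cons l rest ih =>
    by_cases h : PySem.Chars.isIn ['\t'] l.toList = true
    · simp [pvLastTab, h]
    · simp [pvLastTab, h, ih]

theorem pvFold_eq (t : List String) :
    ∀ (ctx : List String) (q a : Option String),
    t.foldl pvStepA (ctx, q, a) =
      (ctx ++ (t.filter (fun l => !PySem.Str.isIn "\t" l)).map pvAfterSpace,
       (pvLastTab t.reverse).elim (q, a) (fun p => (some p.1, p.2))) := by
  induction t with
  | nil => intro ctx q a; simp [pvLastTab]
  | cons l rest ih =>
    intro ctx q a
    simp only [List.foldl_cons, List.reverse_cons, pvLastTab_append]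
    by_cases h : PySem.Chars.isIn ['\t'] l.toList = true
    · have hs : pvStepA (ctx, q, a) l =
          (ctx,
           some (pvAfterSpace (PySem.List.pyGetD ((PySem.Str.split? l "\t").getD []) 0 "")),
           PySem.List.pyGet? ((PySem.Str.split? l "\t").getD []) 1) := by
        simp [pvStepA, h]
      rw [hs, ih]
      rcases pvLastTab rest.reverse with _ | p <;>
        simp [pvLastTab, h]
    · have hs : pvStepA (ctx, q, a) l = (ctx ++ [pvAfterSpace l], q, a) := by
        simp [pvStepA, h]
      rw [hs, ih]
      rcases pvLastTab rest.reverse with _ | p <;>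
        simp [pvLastTab, h, List.append_assoc]

-- ===== VERDICT (by name: the statement is the Claim_ definition above) =====
theorem parse_story_qa_spec : Claim_equal_parse_story_qa := by
  intro story_lines _
  unfold Spec_parse_story_qa parse_story_qa parse_story_qa_alt
  rw [pvFold_eq]
  rcases pvLastTab story_lines.reverse with _ | p <;> simp
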